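-- pv_equiv track=rewrite | github.com/JMcunst/Baekjoon-Algo | skict/no_2.py | solution
-- ===== SOURCE A (Python) =====
-- import math
--
-- def solution(n, clockwise):
--     answer = [[1] * n for i in range(n)]
--
--     cnt = math.ceil(n/2)
--
--     num = 1
--
--     for i in range(cnt):
--         start, end = i, n-i-1
--
--         if start == end:
--             answer[start][end] = num
--         else:
--             if clockwise:
--                 # answer[start][] top, right
--                 val = num
--                 for i in range(start, end):
--                     answer[start][i] = val
--                     answer[i][end] = val
--                     val += 1
--                 # answer[end][] bottom, left
--                 val = num
--                 for i in range(end,start,-1):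
--                     answer[end][i] = val
--                     answer[i][start] = val
--                     val += 1
--             else:
--                 # answer[start][] top, right
--                 val = num
--                 for i in range(end,start,-1):
--                     answer[start][i] = val
--                     answer[i][end] = val
--                     val += 1
--                 # answer[end][] bottom, left
--                 val = num
--                 for i in range(start, end):
--                     answer[end][i] = val
--                     answer[i][start] = val
--                     val += 1
--
--             diff = end - start
--             num += diff
--
--     return answer
-- ===== SOURCE B (Python) =====
-- def _cell(n, clockwise, r, c):
--     k = min(r, c, n - 1 - r, n - 1 - c)
--     s, e = k, n - 1 - k
--     num = 1 + k * (n - k)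
--     if s == e:
--         return num
--     if clockwise:
--         if r == s and c < e:
--             return num + (c - s)
--         if c == e and r < e:
--             return num + (r - s)
--         if r == e and s < c:
--             return num + (e - c)
--         return num + (e - r)
--     else:
--         if r == s and s < c:
--             return num + (e - c)
--         if c == e and s < r:
--             return num + (e - r)
--         if r == e and c < e:
--             return num + (c - s)
--         return num + (r - s)
--
-- def solution(n, clockwise):
--     return [[_cell(n, clockwise, r, c) for c in range(n)] for r in range(n)]
-- ===== Notes on version B (the rewrite author's own statement) =====
-- stated objective: alternative
-- what changed: A fills each ring of the matrix imperatively with four paired edge loops and a running counter; B computes every cell independently from a closed per-cell formula (ring index, ring base value, per-side offset) and builds the matrix with a double comprehension.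
import Mathlib
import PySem

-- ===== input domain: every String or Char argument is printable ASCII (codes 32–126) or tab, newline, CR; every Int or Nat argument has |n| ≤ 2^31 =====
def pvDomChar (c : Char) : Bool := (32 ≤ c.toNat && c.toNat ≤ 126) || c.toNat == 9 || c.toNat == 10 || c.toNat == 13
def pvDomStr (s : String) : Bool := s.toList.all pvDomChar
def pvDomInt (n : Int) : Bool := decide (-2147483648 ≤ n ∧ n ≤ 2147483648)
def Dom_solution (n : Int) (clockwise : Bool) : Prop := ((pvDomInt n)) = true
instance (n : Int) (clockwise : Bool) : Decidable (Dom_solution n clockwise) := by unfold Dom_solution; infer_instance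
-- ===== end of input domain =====

-- B replaces A's imperative ring-by-ring edge filling by a closed per-cell formula (same cost, different algorithm).

-- ===== PORT A =====
-- Python `m[r][c] = v`; exact for the writes A performs: every index it writes is provably in [0, n).
def pvSet2 (m : List (List Int)) (r c : Int) (v : Int) : List (List Int) :=
  m.modify r.toNat (fun row => row.set c.toNat v)

def solution (n : Int) (clockwise : Bool) : List (List Int) :=
  -- answer = [[1] * n for i in range(n)]
  let answer : List (List Int) := (PySem.List.pyRange 0 n).map (fun _ => List.replicate n.toNat 1)
  -- cnt = math.ceil(n/2)  (exact as integer ceiling for |n| ≤ 2^31)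
  let cnt : Int := PySem.Int.floordiv (n + 1) 2
  ((PySem.List.pyRange 0 cnt).foldl (fun (st : List (List Int) × Int) i =>
      if i = n - i - 1 then (pvSet2 st.1 i (n - i - 1) st.2, st.2)
      else if clockwise then
        ((PySem.List.pyRange i (n - i - 1)).foldl
            (fun (p : List (List Int) × Int) j => (pvSet2 (pvSet2 p.1 i j p.2) j (n - i - 1) p.2, p.2 + 1))
            (st.1, st.2) |>.1
          |> fun a1 =>
        ((PySem.List.pyRange (n - i - 1) i (-1)).foldl
            (fun (p : List (List Int) × Int) j => (pvSet2 (pvSet2 p.1 (n - i - 1) j p.2) j i p.2, p.2 + 1))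
            (a1, st.2) |>.1, st.2 + ((n - i - 1) - i)))
      else
        ((PySem.List.pyRange (n - i - 1) i (-1)).foldl
            (fun (p : List (List Int) × Int) j => (pvSet2 (pvSet2 p.1 i j p.2) j (n - i - 1) p.2, p.2 + 1))
            (st.1, st.2) |>.1
          |> fun a1 =>
        ((PySem.List.pyRange i (n - i - 1)).foldl
            (fun (p : List (List Int) × Int) j => (pvSet2 (pvSet2 p.1 (n - i - 1) j p.2) j i p.2, p.2 + 1))
            (a1, st.2) |>.1, st.2 + ((n - i - 1) - i))))
    (answer, 1)).1

-- ===== PORT B =====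
def pvCell (n : Int) (clockwise : Bool) (r c : Int) : Int :=
  let k := min (min r c) (min (n - 1 - r) (n - 1 - c))
  let s := k
  let e := n - 1 - k
  let num := 1 + k * (n - k)
  if s = e then num
  else if clockwise then
    if r = s ∧ c < e then num + (c - s)
    else if c = e ∧ r < e then num + (r - s)
    else if r = e ∧ s < c then num + (e - c)
    else num + (e - r)
  else
    if r = s ∧ s < c then num + (e - c)
    else if c = e ∧ s < r then num + (e - r)
    else if r = e ∧ c < e then num + (c - s)
    else num + (r - s)

def solution_alt (n : Int) (clockwise : Bool) : List (List Int) :=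
  (PySem.List.pyRange 0 n).map (fun r => (PySem.List.pyRange 0 n).map (fun c => pvCell n clockwise r c))

-- ===== PRECONDITION & SPEC =====
def Spec_solution (n : Int) (clockwise : Bool) (out : List (List Int)) : Prop := out = solution_alt n clockwise
instance (n : Int) (clockwise : Bool) (out : List (List Int)) : Decidable (Spec_solution n clockwise out) := by unfold Spec_solution; infer_instance

-- ===== CLAIM (what is proved, stated in full; the proofs are below) =====
def Claim_equal_solution : Prop := ∀ (n : Int) (clockwise : Bool), Dom_solution n clockwise → Spec_solution n clockwise (solution n clockwise)

-- ===== LEMMAS AND PROOFS =====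

-- matrix built from a pointwise function, in the shape both ports produce
def pvMk (n : Int) (f : Int → Int → Int) : List (List Int) :=
  (PySem.List.pyRange 0 n).map (fun r => (PySem.List.pyRange 0 n).map (f r))

-- state of A's matrix after the first k rings have been filled
def pvG (n : Int) (cw : Bool) (k : Int) (r c : Int) : Int :=
  if min (min r c) (min (n - 1 - r) (n - 1 - c)) < k then pvCell n cw r c else 1

lemma pvMk_eq (n : Int) (f : Int → Int → Int) :
    pvMk n f = (List.range n.toNat).map (fun i : Nat => (List.range n.toNat).map (fun j : Nat => f (i : Int) (j : Int))) := by
  unfold pvMk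
  rcases le_or_gt n 0 with h | h
  · rw [PySem.List.pyRange_one_eq_nil h]
    have : n.toNat = 0 := by omega
    simp [this]
  · have hn : PySem.List.pyRange 0 n = (List.range n.toNat).map (fun k : Nat => (k : Int)) := by
      conv_lhs => rw [show n = ((n.toNat : Nat) : Int) by omega]
      exact PySem.List.pyRange_zero_natCast n.toNat
    rw [hn]
    simp [List.map_map, Function.comp]

lemma pvMk_congr (n : Int) (f g : Int → Int → Int)
    (h : ∀ r c, 0 ≤ r → r < n → 0 ≤ c → c < n → f r c = g r c) : pvMk n f = pvMk n g := by
  unfold pvMk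
  apply List.map_congr_left
  intro r hr
  apply List.map_congr_left
  intro c hc
  rw [PySem.List.mem_pyRange_one] at hr hc
  exact h r c hr.1 hr.2 hc.1 hc.2

lemma pvSet2_mk (n : Int) (f : Int → Int → Int) (r c v : Int)
    (hr0 : 0 ≤ r) (hrn : r < n) (hc0 : 0 ≤ c) (hcn : c < n) :
    pvSet2 (pvMk n f) r c v = pvMk n (fun r' c' => if r' = r ∧ c' = c then v else f r' c') := by
  rw [pvMk_eq, pvMk_eq]
  unfold pvSet2
  apply List.ext_getElem
  · simp
  · intro i h1 h2
    simp only [List.length_modify, List.length_map, List.length_range] at h1 h2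
    rw [List.getElem_modify]
    simp only [List.getElem_map, List.getElem_range]
    by_cases hi : r.toNat = i
    · rw [if_pos hi]
      apply List.ext_getElem
      · simp
      · intro j hj1 hj2
        simp only [List.length_set, List.length_map, List.length_range] at hj1 hj2
        rw [List.getElem_set]
        simp only [List.getElem_map, List.getElem_range]
        split_ifs with hA hB hB
        · rfl
        · exfalso; omega
        · exfalso; omega
        · rfl
    · rw [if_neg hi]
      apply List.ext_getElem
      · simp
      · intro j hj1 hj2
        simp only [List.getElem_map, List.getElem_range]
        split_ifs with hA
        · exfalso; omega
        · rfl

lemma pvLoopUp (n x y w e : Int) (hx0 : 0 ≤ x) (hxn : x < n) (hy0 : 0 ≤ y) (hyn : y < n)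
    (hen : e < n) (hxy : e ≤ x ∨ e ≤ y) :
    ∀ (m : Nat) (a : Int) (f : Int → Int → Int) (v : Int), 0 ≤ a → a + m = e → v = w + a →
    (PySem.List.pyRange a e).foldl
        (fun (p : List (List Int) × Int) j => (pvSet2 (pvSet2 p.1 x j p.2) j y p.2, p.2 + 1))
        (pvMk n f, v)
      = (pvMk n (fun r c => if r = x ∧ a ≤ c ∧ c < e then w + c
            else if c = y ∧ a ≤ r ∧ r < e then w + r else f r c), w + e) := by
  intro m
  induction m with
  | zero =>
    intro a f v ha0 hae hv
    rw [PySem.List.pyRange_one_eq_nil (by omega), List.foldl_nil, Prod.mk.injEq]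
    refine ⟨pvMk_congr n _ _ fun r c hr0 hrn hc0 hcn => ?_, by omega⟩
    split_ifs <;> omega
  | succ m ih =>
    intro a f v ha0 hae hv
    rw [PySem.List.pyRange_one_cons (by omega), List.foldl_cons]
    rw [pvSet2_mk n f x a v hx0 hxn ha0 (by omega),
        pvSet2_mk n _ a y v ha0 (by omega) hy0 hyn,
        ih (a + 1) _ (v + 1) (by omega) (by omega) (by omega), Prod.mk.injEq]
    refine ⟨pvMk_congr n _ _ fun r c hr0 hrn hc0 hcn => ?_, rfl⟩
    split_ifs <;> omega

lemma pvLoopUp1 (n x y w e : Int) (hx0 : 0 ≤ x) (hxn : x < n) (hy0 : 0 ≤ y) (hyn : y < n)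
    (hen : e < n) (hxy : e ≤ x ∨ e ≤ y) (m : Nat) (a : Int) (f : Int → Int → Int) (v : Int)
    (ha0 : 0 ≤ a) (hae : a + m = e) (hv : v = w + a) :
    ((PySem.List.pyRange a e).foldl
        (fun (p : List (List Int) × Int) j => (pvSet2 (pvSet2 p.1 x j p.2) j y p.2, p.2 + 1))
        (pvMk n f, v)).1
      = pvMk n (fun r c => if r = x ∧ a ≤ c ∧ c < e then w + c
            else if c = y ∧ a ≤ r ∧ r < e then w + r else f r c) := by
  rw [pvLoopUp n x y w e hx0 hxn hy0 hyn hen hxy m a f v ha0 hae hv]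

lemma pvLoopDown (n x y w s : Int) (hx0 : 0 ≤ x) (hxn : x < n) (hy0 : 0 ≤ y) (hyn : y < n)
    (hs0 : 0 ≤ s) (hxy : x ≤ s ∨ y ≤ s) :
    ∀ (m : Nat) (a : Int) (f : Int → Int → Int) (v : Int), a < n → a - m = s → v = w - a →
    (PySem.List.pyRange a s (-1)).foldl
        (fun (p : List (List Int) × Int) j => (pvSet2 (pvSet2 p.1 x j p.2) j y p.2, p.2 + 1))
        (pvMk n f, v)
      = (pvMk n (fun r c => if r = x ∧ s < c ∧ c ≤ a then w - c
            else if c = y ∧ s < r ∧ r ≤ a then w - r else f r c), w - s) := by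
  intro m
  induction m with
  | zero =>
    intro a f v han has hv
    rw [PySem.List.pyRange_neg_one_eq_nil (by omega), List.foldl_nil, Prod.mk.injEq]
    refine ⟨pvMk_congr n _ _ fun r c hr0 hrn hc0 hcn => ?_, by omega⟩
    split_ifs <;> omega
  | succ m ih =>
    intro a f v han has hv
    rw [PySem.List.pyRange_neg_one_cons (by omega), List.foldl_cons]
    rw [pvSet2_mk n f x a v hx0 hxn (by omega) han,
        pvSet2_mk n _ a y v (by omega) han hy0 hyn,
        ih (a - 1) _ (v + 1) (by omega) (by omega) (by omega), Prod.mk.injEq]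
    refine ⟨pvMk_congr n _ _ fun r c hr0 hrn hc0 hcn => ?_, rfl⟩
    split_ifs <;> omega

lemma pvLoopDown1 (n x y w s : Int) (hx0 : 0 ≤ x) (hxn : x < n) (hy0 : 0 ≤ y) (hyn : y < n)
    (hs0 : 0 ≤ s) (hxy : x ≤ s ∨ y ≤ s) (m : Nat) (a : Int) (f : Int → Int → Int) (v : Int)
    (han : a < n) (has : a - m = s) (hv : v = w - a) :
    ((PySem.List.pyRange a s (-1)).foldl
        (fun (p : List (List Int) × Int) j => (pvSet2 (pvSet2 p.1 x j p.2) j y p.2, p.2 + 1))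
        (pvMk n f, v)).1
      = pvMk n (fun r c => if r = x ∧ s < c ∧ c ≤ a then w - c
            else if c = y ∧ s < r ∧ r ≤ a then w - r else f r c) := by
  rw [pvLoopDown n x y w s hx0 hxn hy0 hyn hs0 hxy m a f v han has hv]

-- one clockwise ring: the two edge loops on ring k turn pvG k into pvG (k+1)
set_option maxHeartbeats 1000000 in
lemma pvRingStep_cw (n k num : Int) (h0 : 0 ≤ k) (hse : k < n - k - 1)
    (hnum : num = 1 + k * (n - k)) (r c : Int)
    (hr0 : 0 ≤ r) (hrn : r < n) (hc0 : 0 ≤ c) (hcn : c < n) :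
    (if r = n - k - 1 ∧ k < c ∧ c ≤ n - k - 1 then (num + (n - k - 1)) - c
     else if c = k ∧ k < r ∧ r ≤ n - k - 1 then (num + (n - k - 1)) - r
     else if r = k ∧ k ≤ c ∧ c < n - k - 1 then (num - k) + c
     else if c = n - k - 1 ∧ k ≤ r ∧ r < n - k - 1 then (num - k) + r
     else pvG n true k r c)
    = pvG n true (k + 1) r c := by
  simp only [pvG, pvCell]
  have hfacts : (min (min r c) (min (n - 1 - r) (n - 1 - c))) ≤ r ∧
      (min (min r c) (min (n - 1 - r) (n - 1 - c))) ≤ c ∧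
      (min (min r c) (min (n - 1 - r) (n - 1 - c))) ≤ n - 1 - r ∧
      (min (min r c) (min (n - 1 - r) (n - 1 - c))) ≤ n - 1 - c ∧
      ((min (min r c) (min (n - 1 - r) (n - 1 - c))) = r ∨
       (min (min r c) (min (n - 1 - r) (n - 1 - c))) = c ∨
       (min (min r c) (min (n - 1 - r) (n - 1 - c))) = n - 1 - r ∨
       (min (min r c) (min (n - 1 - r) (n - 1 - c))) = n - 1 - c) := by omega
  generalize hg : min (min r c) (min (n - 1 - r) (n - 1 - c)) = m1 at hfacts ⊢
  clear hg
  rcases lt_trichotomy m1 k with hμ | hμ | hμ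
  · rw [if_neg (show ¬(r = n - k - 1 ∧ k < c ∧ c ≤ n - k - 1) from by omega),
        if_neg (show ¬(c = k ∧ k < r ∧ r ≤ n - k - 1) from by omega),
        if_neg (show ¬(r = k ∧ k ≤ c ∧ c < n - k - 1) from by omega),
        if_neg (show ¬(c = n - k - 1 ∧ k ≤ r ∧ r < n - k - 1) from by omega),
        if_pos (show m1 < k from hμ), if_pos (show m1 < k + 1 from by omega)]
  · subst hμ
    rw [← hnum, if_neg (show ¬(m1 < m1) from by omega), if_pos (show m1 < m1 + 1 from by omega)]
    split_ifs <;> first | rfl | omega | (exfalso; assumption)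
  · rw [if_neg (show ¬(r = n - k - 1 ∧ k < c ∧ c ≤ n - k - 1) from by omega),
        if_neg (show ¬(c = k ∧ k < r ∧ r ≤ n - k - 1) from by omega),
        if_neg (show ¬(r = k ∧ k ≤ c ∧ c < n - k - 1) from by omega),
        if_neg (show ¬(c = n - k - 1 ∧ k ≤ r ∧ r < n - k - 1) from by omega),
        if_neg (show ¬(m1 < k) from by omega), if_neg (show ¬(m1 < k + 1) from by omega)]

-- one counter-clockwise ring
set_option maxHeartbeats 1000000 in
lemma pvRingStep_ccw (n k num : Int) (h0 : 0 ≤ k) (hse : k < n - k - 1)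
    (hnum : num = 1 + k * (n - k)) (r c : Int)
    (hr0 : 0 ≤ r) (hrn : r < n) (hc0 : 0 ≤ c) (hcn : c < n) :
    (if r = n - k - 1 ∧ k ≤ c ∧ c < n - k - 1 then (num - k) + c
     else if c = k ∧ k ≤ r ∧ r < n - k - 1 then (num - k) + r
     else if r = k ∧ k < c ∧ c ≤ n - k - 1 then (num + (n - k - 1)) - c
     else if c = n - k - 1 ∧ k < r ∧ r ≤ n - k - 1 then (num + (n - k - 1)) - r
     else pvG n false k r c)
    = pvG n false (k + 1) r c := by
  simp only [pvG, pvCell]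
  have hfacts : (min (min r c) (min (n - 1 - r) (n - 1 - c))) ≤ r ∧
      (min (min r c) (min (n - 1 - r) (n - 1 - c))) ≤ c ∧
      (min (min r c) (min (n - 1 - r) (n - 1 - c))) ≤ n - 1 - r ∧
      (min (min r c) (min (n - 1 - r) (n - 1 - c))) ≤ n - 1 - c ∧
      ((min (min r c) (min (n - 1 - r) (n - 1 - c))) = r ∨
       (min (min r c) (min (n - 1 - r) (n - 1 - c))) = c ∨
       (min (min r c) (min (n - 1 - r) (n - 1 - c))) = n - 1 - r ∨
       (min (min r c) (min (n - 1 - r) (n - 1 - c))) = n - 1 - c) := by omega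
  generalize hg : min (min r c) (min (n - 1 - r) (n - 1 - c)) = m1 at hfacts ⊢
  clear hg
  rcases lt_trichotomy m1 k with hμ | hμ | hμ
  · rw [if_neg (show ¬(r = n - k - 1 ∧ k ≤ c ∧ c < n - k - 1) from by omega),
        if_neg (show ¬(c = k ∧ k ≤ r ∧ r < n - k - 1) from by omega),
        if_neg (show ¬(r = k ∧ k < c ∧ c ≤ n - k - 1) from by omega),
        if_neg (show ¬(c = n - k - 1 ∧ k < r ∧ r ≤ n - k - 1) from by omega),
        if_pos (show m1 < k from hμ), if_pos (show m1 < k + 1 from by omega)]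
  · subst hμ
    rw [← hnum, if_neg (show ¬(m1 < m1) from by omega), if_pos (show m1 < m1 + 1 from by omega)]
    split_ifs <;> first | rfl | omega | (exfalso; assumption)
  · rw [if_neg (show ¬(r = n - k - 1 ∧ k ≤ c ∧ c < n - k - 1) from by omega),
        if_neg (show ¬(c = k ∧ k ≤ r ∧ r < n - k - 1) from by omega),
        if_neg (show ¬(r = k ∧ k < c ∧ c ≤ n - k - 1) from by omega),
        if_neg (show ¬(c = n - k - 1 ∧ k < r ∧ r ≤ n - k - 1) from by omega),
        if_neg (show ¬(m1 < k) from by omega), if_neg (show ¬(m1 < k + 1) from by omega)]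

-- the degenerate central ring (start == end): one write turns pvG k into pvG (k+1)
set_option maxHeartbeats 1000000 in
lemma pvCenterStep (n k num : Int) (cw : Bool) (h0 : 0 ≤ k) (hc : k = n - k - 1)
    (hnum : num = 1 + k * (n - k)) (r c : Int)
    (hr0 : 0 ≤ r) (hrn : r < n) (hc0 : 0 ≤ c) (hcn : c < n) :
    (if r = k ∧ c = n - k - 1 then num else pvG n cw k r c) = pvG n cw (k + 1) r c := by
  simp only [pvG, pvCell]
  have hfacts : (min (min r c) (min (n - 1 - r) (n - 1 - c))) ≤ r ∧
      (min (min r c) (min (n - 1 - r) (n - 1 - c))) ≤ c ∧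
      (min (min r c) (min (n - 1 - r) (n - 1 - c))) ≤ n - 1 - r ∧
      (min (min r c) (min (n - 1 - r) (n - 1 - c))) ≤ n - 1 - c ∧
      ((min (min r c) (min (n - 1 - r) (n - 1 - c))) = r ∨
       (min (min r c) (min (n - 1 - r) (n - 1 - c))) = c ∨
       (min (min r c) (min (n - 1 - r) (n - 1 - c))) = n - 1 - r ∨
       (min (min r c) (min (n - 1 - r) (n - 1 - c))) = n - 1 - c) := by omega
  generalize hg : min (min r c) (min (n - 1 - r) (n - 1 - c)) = m1 at hfacts ⊢
  clear hg
  rcases lt_trichotomy m1 k with hμ | hμ | hμ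
  · rw [if_neg (show ¬(r = k ∧ c = n - k - 1) from by omega),
        if_pos (show m1 < k from hμ), if_pos (show m1 < k + 1 from by omega)]
  · subst hμ
    rw [← hnum, if_neg (show ¬(m1 < m1) from by omega), if_pos (show m1 < m1 + 1 from by omega),
        if_pos (show r = m1 ∧ c = n - m1 - 1 from by omega),
        if_pos (show m1 = n - 1 - m1 from by omega)]
  · rw [if_neg (show ¬(r = k ∧ c = n - k - 1) from by omega),
        if_neg (show ¬(m1 < k) from by omega), if_neg (show ¬(m1 < k + 1) from by omega)]

lemma pvRange_len (n : Int) (h : 0 ≤ n) : (PySem.List.pyRange 0 n).length = n.toNat := by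
  conv_lhs => rw [show n = ((n.toNat : Nat) : Int) by omega]
  rw [PySem.List.pyRange_zero_natCast]
  simp

lemma pvInit (n : Int) (h : 0 ≤ n) :
    (PySem.List.pyRange 0 n).map (fun _ => List.replicate n.toNat (1 : Int))
      = pvMk n (fun _ _ => 1) := by
  unfold pvMk
  apply List.map_congr_left
  intro r _
  rw [List.map_const', pvRange_len n h]

-- the whole outer loop: rings k, k+1, … of A turn pvG k into pvG cnt
set_option maxHeartbeats 1000000 in
lemma pvOuter (n cnt : Int) (cw : Bool) (hn : 0 < n) (hc1 : 2 * cnt ≤ n + 1) (hc2 : n ≤ 2 * cnt) :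
    ∀ (m : Nat) (k num : Int), 0 ≤ k → k + m = cnt → num = 1 + k * (n - k) →
    ((PySem.List.pyRange k cnt).foldl (fun (st : List (List Int) × Int) i =>
        if i = n - i - 1 then (pvSet2 st.1 i (n - i - 1) st.2, st.2)
        else if cw then
          ((PySem.List.pyRange i (n - i - 1)).foldl
              (fun (p : List (List Int) × Int) j => (pvSet2 (pvSet2 p.1 i j p.2) j (n - i - 1) p.2, p.2 + 1))
              (st.1, st.2) |>.1
            |> fun a1 =>
          ((PySem.List.pyRange (n - i - 1) i (-1)).foldl
              (fun (p : List (List Int) × Int) j => (pvSet2 (pvSet2 p.1 (n - i - 1) j p.2) j i p.2, p.2 + 1))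
              (a1, st.2) |>.1, st.2 + ((n - i - 1) - i)))
        else
          ((PySem.List.pyRange (n - i - 1) i (-1)).foldl
              (fun (p : List (List Int) × Int) j => (pvSet2 (pvSet2 p.1 i j p.2) j (n - i - 1) p.2, p.2 + 1))
              (st.1, st.2) |>.1
            |> fun a1 =>
          ((PySem.List.pyRange i (n - i - 1)).foldl
              (fun (p : List (List Int) × Int) j => (pvSet2 (pvSet2 p.1 (n - i - 1) j p.2) j i p.2, p.2 + 1))
              (a1, st.2) |>.1, st.2 + ((n - i - 1) - i))))
      (pvMk n (pvG n cw k), num)).1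
    = pvMk n (pvG n cw cnt) := by
  intro m
  induction m with
  | zero =>
    intro k num h0 hkm hnum
    rw [PySem.List.pyRange_one_eq_nil (by omega), List.foldl_nil]
    rw [show k = cnt from by omega]
  | succ m ih =>
    intro k num h0 hkm hnum
    have hkc : k < cnt := by omega
    have hke : k ≤ n - k - 1 := by omega
    rw [PySem.List.pyRange_one_cons (by omega), List.foldl_cons]
    by_cases hmid : k = n - k - 1
    · rw [if_pos hmid]
      rw [show ((pvMk n (pvG n cw k), num) : List (List Int) × Int).1 = pvMk n (pvG n cw k) from rfl,
          show ((pvMk n (pvG n cw k), num) : List (List Int) × Int).2 = num from rfl]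
      rw [pvSet2_mk n _ k (n - k - 1) num h0 (by omega) (by omega) (by omega)]
      rw [pvMk_congr n _ _ (fun r c hr0 hrn hc0 hcn =>
            pvCenterStep n k num cw h0 hmid hnum r c hr0 hrn hc0 hcn)]
      rw [PySem.List.pyRange_one_eq_nil (show cnt ≤ k + 1 from by omega), List.foldl_nil]
      rw [show k + 1 = cnt from by omega]
    · rw [if_neg hmid]
      have hklt : k < n - k - 1 := by omega
      have hnum' : num + ((n - k - 1) - k) = 1 + (k + 1) * (n - (k + 1)) := by rw [hnum]; ring
      cases cw with
      | true =>
        rw [if_pos rfl]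
        rw [show ((pvMk n (pvG n true k), num) : List (List Int) × Int).1 = pvMk n (pvG n true k) from rfl,
            show ((pvMk n (pvG n true k), num) : List (List Int) × Int).2 = num from rfl]
        rw [pvLoopUp1 n k (n - k - 1) (num - k) (n - k - 1) h0 (by omega) (by omega) (by omega)
              (by omega) (by omega) (n - k - 1 - k).toNat k (pvG n true k) num h0 (by omega) (by omega)]
        beta_reduce
        rw [pvLoopDown1 n (n - k - 1) k (num + (n - k - 1)) k (by omega) (by omega) h0 (by omega)
              h0 (by omega) (n - k - 1 - k).toNat (n - k - 1) _ num (by omega) (by omega) (by omega)]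
        rw [pvMk_congr n _ _ (fun r c hr0 hrn hc0 hcn =>
              pvRingStep_cw n k num h0 hklt hnum r c hr0 hrn hc0 hcn)]
        exact ih (k + 1) (num + ((n - k - 1) - k)) (by omega) (by omega) hnum'
      | false =>
        rw [if_neg (by simp)]
        rw [show ((pvMk n (pvG n false k), num) : List (List Int) × Int).1 = pvMk n (pvG n false k) from rfl,
            show ((pvMk n (pvG n false k), num) : List (List Int) × Int).2 = num from rfl]
        rw [pvLoopDown1 n k (n - k - 1) (num + (n - k - 1)) k h0 (by omega) (by omega) (by omega)
              h0 (by omega) (n - k - 1 - k).toNat (n - k - 1) (pvG n false k) num (by omega) (by omega) (by omega)]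
        beta_reduce
        rw [pvLoopUp1 n (n - k - 1) k (num - k) (n - k - 1) (by omega) (by omega) h0 (by omega)
              (by omega) (by omega) (n - k - 1 - k).toNat k _ num h0 (by omega) (by omega)]
        rw [pvMk_congr n _ _ (fun r c hr0 hrn hc0 hcn =>
              pvRingStep_ccw n k num h0 hklt hnum r c hr0 hrn hc0 hcn)]
        exact ih (k + 1) (num + ((n - k - 1) - k)) (by omega) (by omega) hnum'

-- ===== VERDICT (by name: the statement is the Claim_ definition above) =====
theorem solution_spec : Claim_equal_solution := by
  intro n cw _
  show solution n cw = solution_alt n cw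
  have hdm := PySem.Int.floordiv_mul_add_mod (n + 1) 2
  have hm0 := PySem.Int.mod_nonneg (n + 1) (show (0:Int) < 2 by norm_num)
  have hm2 := PySem.Int.mod_lt (n + 1) (show (0:Int) < 2 by norm_num)
  rcases le_or_gt n 0 with hn | hn
  · simp only [solution, solution_alt]
    rw [PySem.List.pyRange_one_eq_nil hn,
        PySem.List.pyRange_one_eq_nil (show PySem.Int.floordiv (n+1) 2 ≤ 0 from by omega)]
    rfl
  · simp only [solution, solution_alt]
    rw [pvInit n (by omega)]
    rw [pvMk_congr n (fun _ _ => (1:Int)) (pvG n cw 0) (fun r c hr0 hrn hc0 hcn => by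
          simp only [pvG]
          rw [if_neg (by omega)])]
    rw [pvOuter n (PySem.Int.floordiv (n+1) 2) cw hn (by omega) (by omega)
          (PySem.Int.floordiv (n+1) 2).toNat 0 1 le_rfl (by omega) (by ring)]
    exact pvMk_congr n _ _ (fun r c hr0 hrn hc0 hcn => by
      simp only [pvG]
      rw [if_pos (by omega)])
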